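-- pv_equiv track=rewrite | github.com/FrankNdemo/The-Hub | backend/apps/bookings/delivery.py | fold_ical_line
-- ===== SOURCE A (Python) =====
-- def fold_ical_line(value: str) -> str:
--     if len(value) <= 73:
--         return value
--
--     parts: list[str] = []
--     remainder = value
--     while remainder:
--         parts.append(remainder[:73])
--         remainder = remainder[73:]
--         if remainder:
--             remainder = f" {remainder}"
--
--     return "\r\n".join(parts)
-- ===== SOURCE B (Python) =====
-- def fold_ical_line(value: str) -> str:
--     if len(value) <= 73:
--         return value
--     rest = value[73:]
--     chunks = "".join("\r\n " + rest[i:i + 72] for i in range(0, len(rest), 72))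
--     return value[:73] + chunks
-- ===== Notes on version B (the rewrite author's own statement) =====
-- stated objective: faster
-- what changed: B replaces A's while loop, which repeatedly prepends a space to the remainder and reslices the whole remainder each round, by a closed split: the first 73 characters plus stride-72 chunks of the tail, each chunk prefixed with CR, LF and a space.
import Mathlib
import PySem

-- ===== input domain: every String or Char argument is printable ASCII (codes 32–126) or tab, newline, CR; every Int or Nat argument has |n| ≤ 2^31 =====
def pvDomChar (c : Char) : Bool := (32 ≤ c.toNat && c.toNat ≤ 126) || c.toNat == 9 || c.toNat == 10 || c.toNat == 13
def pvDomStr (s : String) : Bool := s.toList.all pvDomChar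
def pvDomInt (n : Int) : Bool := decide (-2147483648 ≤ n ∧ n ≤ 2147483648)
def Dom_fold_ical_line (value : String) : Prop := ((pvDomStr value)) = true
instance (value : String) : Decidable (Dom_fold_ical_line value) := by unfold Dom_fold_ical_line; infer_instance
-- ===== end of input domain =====

-- B builds the continuation chunks with one stride-72 range over the tail instead of
-- A's repeated space-prepend-and-reslice of the whole remainder; same return value, measured faster.

-- ===== PORT A =====
-- the while loop of A: collect 73-char chunks, re-prepending a space each round
def foldAParts (r : List Char) : List (List Char) :=
  if r = [] then []
  else
    PySem.List.slice r none (some 73) ::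
      (if PySem.List.slice r (some 73) none = [] then []
       else foldAParts (' ' :: PySem.List.slice r (some 73) none))
termination_by r.length
decreasing_by
  rename_i _hr hrest
  rw [PySem.List.slice_from r (by omega : (0:Int) ≤ 73)] at hrest ⊢
  simp only [List.drop_eq_nil_iff, not_le, show ((73:Int)).toNat = 73 from rfl] at hrest
  simp
  omega

def fold_ical_line (value : String) : String :=
  if PySem.Str.len value ≤ 73 then value
  else String.ofList (PySem.Chars.join ['\r', '\n'] (foldAParts value.toList))

-- ===== PORT B =====
def fold_ical_line_alt (value : String) : String :=
  if PySem.Str.len value ≤ 73 then value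
  else
    let l := value.toList
    let rest := PySem.List.slice l (some 73) none
    let chunks := (PySem.List.pyRange 0 (rest.length : Int) 72).flatMap
      (fun i => '\r' :: '\n' :: ' ' :: PySem.List.slice rest (some i) (some (i + 72)))
    String.ofList (PySem.List.slice l none (some 73) ++ chunks)

-- ===== PRECONDITION & SPEC =====
def Spec_fold_ical_line (value : String) (out : String) : Prop := out = fold_ical_line_alt value
instance (value : String) (out : String) : Decidable (Spec_fold_ical_line value out) := by unfold Spec_fold_ical_line; infer_instance

-- ===== CLAIM (what is proved, stated in full; the proofs are below) =====
def Claim_equal_fold_ical_line : Prop := ∀ (value : String), Dom_fold_ical_line value → Spec_fold_ical_line value (fold_ical_line value)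

-- ===== LEMMAS AND PROOFS =====

-- B's continuation chunks, in drop/take form
def chunksOf (rest : List Char) : List Char :=
  (PySem.List.pyRange 0 (rest.length : Int) 72).flatMap
    (fun i => '\r' :: '\n' :: ' ' :: ((rest.drop i.toNat).take 72))

lemma pyRange72_cons (b : Int) (hb : 0 < b) :
    PySem.List.pyRange 0 b 72 = 0 :: (PySem.List.pyRange 0 (b - 72) 72).map (· + 72) := by
  rw [PySem.List.pyRange_of_pos 0 b (by omega), PySem.List.pyRange_of_pos 0 (b - 72) (by omega)]
  have hcnt : (if (0:Int) < b then ((b - 0 + 72 - 1) / 72).toNat else 0)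
      = (if (0:Int) < b - 72 then ((b - 72 - 0 + 72 - 1) / 72).toNat else 0) + 1 := by
    split_ifs <;> omega
  rw [hcnt, List.range_succ_eq_map, List.map_cons, List.map_map, List.map_map]
  congr 1

lemma foldAParts_ne_nil (r : List Char) (h : r ≠ []) : foldAParts r ≠ [] := by
  rw [foldAParts]
  simp [h]

lemma join_cons_of_ne (sep p : List Char) (l : List (List Char)) (h : l ≠ []) :
    PySem.Chars.join sep (p :: l) = p ++ sep ++ PySem.Chars.join sep l := by
  cases l with
  | nil => exact absurd rfl h
  | cons q t => exact PySem.Chars.join_cons_cons sep p q t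

lemma chunksOf_nil : chunksOf [] = [] := by decide

lemma chunksOf_cons (rest : List Char) (h : rest ≠ []) :
    chunksOf rest = '\r' :: '\n' :: ' ' :: rest.take 72 ++ chunksOf (rest.drop 72) := by
  unfold chunksOf
  have hlen : (0:Int) < (rest.length : Int) := by
    have := List.length_pos_iff.mpr h; exact_mod_cast this
  rw [pyRange72_cons _ hlen]
  simp only [List.flatMap_cons, List.flatMap_map]
  have hshift : (List.flatMap
        (fun i => '\r' :: '\n' :: ' ' :: ((rest.drop ((i : Int) + 72).toNat).take 72))
        (PySem.List.pyRange 0 ((rest.length : Int) - 72) 72))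
      = List.flatMap
        (fun i => '\r' :: '\n' :: ' ' :: (((rest.drop 72).drop (i : Int).toNat).take 72))
        (PySem.List.pyRange 0 (((rest.drop 72).length : Int)) 72) := by
    by_cases hle : rest.length ≤ 72
    · have h1 : PySem.List.pyRange 0 ((rest.length : Int) - 72) 72 = [] := by
        rw [PySem.List.pyRange_of_pos _ _ (by omega)]
        simp; omega
      have h2 : PySem.List.pyRange 0 (((rest.drop 72).length : Int)) 72 = [] := by
        rw [PySem.List.pyRange_of_pos _ _ (by omega)]
        simp; omega
      rw [h1, h2]
      simp
    · have hlen2 : ((List.drop 72 rest).length : Int) = (rest.length : Int) - 72 := by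
        simp; omega
      rw [hlen2]
      apply List.flatMap_congr
      intro i hi
      have hi0 : 0 ≤ i := by
        have := (PySem.List.mem_pyRange_iff_of_pos (show (0:Int) < 72 by omega) i).mp hi
        omega
      have ht : (i + 72).toNat = 72 + i.toNat := by omega
      rw [ht, ← List.drop_drop]
  rw [hshift]
  simp

lemma foldA_join (r : List Char) (h : r ≠ []) :
    PySem.Chars.join ['\r', '\n'] (foldAParts r) = r.take 73 ++ chunksOf (r.drop 73) := by
  generalize hn : r.length = n
  induction n using Nat.strong_induction_on generalizing r with
  | _ n ih =>
    rw [foldAParts]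
    simp only [h, ite_false]
    rw [PySem.List.slice_from r (by omega : (0:Int) ≤ 73),
        PySem.List.slice_to r (by omega : (0:Int) ≤ 73)]
    simp only [show ((73:Int)).toNat = 73 from rfl]
    by_cases hd : List.drop 73 r = []
    · rw [if_pos hd, hd, chunksOf_nil, List.append_nil, PySem.Chars.join_singleton]
    · rw [if_neg hd,
        join_cons_of_ne _ _ _ (foldAParts_ne_nil _ (by simp)),
        ih (' ' :: List.drop 73 r).length
          (by
            have h73 : r.length > 73 := by
              by_contra hc
              exact hd (by simp [List.drop_eq_nil_iff]; omega)
            simp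
            omega)
          (' ' :: List.drop 73 r) (by simp) rfl]
      have ht : (' ' :: List.drop 73 r).take 73 = ' ' :: (List.drop 73 r).take 72 := by
        simp
      have hdd : (' ' :: List.drop 73 r).drop 73 = (List.drop 73 r).drop 72 := by
        simp
      rw [ht, hdd, chunksOf_cons _ hd]
      simp

-- ===== VERDICT (by name: the statement is the Claim_ definition above) =====
theorem fold_ical_line_spec : Claim_equal_fold_ical_line := by
  intro value _
  unfold Spec_fold_ical_line fold_ical_line fold_ical_line_alt
  split_ifs with hle
  · rfl
  · dsimp only
    have hne : value.toList ≠ [] := by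
      rw [PySem.Str.len_eq] at hle
      intro hnil
      rw [hnil] at hle
      simp at hle
    rw [foldA_join _ hne]
    rw [PySem.List.slice_from value.toList (by omega : (0:Int) ≤ 73),
        PySem.List.slice_to value.toList (by omega : (0:Int) ≤ 73)]
    simp only [show ((73:Int)).toNat = 73 from rfl]
    congr 1
    unfold chunksOf
    congr 1
    apply List.flatMap_congr
    intro i hi
    have hi0 : 0 ≤ i := by
      by_cases hpos : (0:Int) < (((value.toList.drop 73)).length : Int)
      · have := (PySem.List.mem_pyRange_iff_of_pos (show (0:Int) < 72 by omega) i).mp hi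
        omega
      · rw [PySem.List.pyRange_of_pos _ _ (by omega : (0:Int) < 72)] at hi
        simp only [if_neg hpos] at hi
        simp at hi
    rw [PySem.List.slice_toNat _ hi0 (by omega)]
    rw [show (i + 72).toNat - i.toNat = 72 by omega]
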